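-- pv_equiv track=rewrite | github.com/VentureCoder/holbertonschool-machine_learning | math/advanced_linear_algebra/4-inverse.py | minor
-- ===== SOURCE A (Python) =====
-- def determinant(matrix):
--     """Helper function to calculate determinant."""
--     if matrix == [[]]:
--         return 1
--
--     n = len(matrix)
--
--     if n == 1:
--         return matrix[0][0]
--
--     if n == 2:
--         return matrix[0][0] * matrix[1][1] - matrix[0][1] * matrix[1][0]
--
--     det = 0
--     for col in range(n):
--         sub = [row[:col] + row[col+1:] for row in matrix[1:]]
--         det += ((-1) ** col) * matrix[0][col] * determinant(sub)
--
--     return det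
--
-- def minor(matrix):
--     """Helper function to calculate minor matrix."""
--     n = len(matrix)
--
--     if n == 1:
--         return [[1]]
--
--     minors = []
--     for i in range(n):
--         row_minors = []
--         for j in range(n):
--             sub = [r[:j] + r[j+1:] for k, r in enumerate(matrix) if k != i]
--             row_minors.append(determinant(sub))
--         minors.append(row_minors)
--
--     return minors
-- ===== SOURCE B (Python) =====
-- def combos(items, k):
--     """All length-k sublists (in order) of items, as tuples."""
--     if k == 0:
--         return [()]
--     if not items:
--         return []
--     first, rest = items[0], items[1:]
--     return [(first,) + t for t in combos(rest, k - 1)] + combos(rest, k)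
--
--
-- def minor(matrix):
--     """Minor matrix via subset dynamic programming: for each deleted row i, one
--     bottom-up DP over column subsets yields ALL n minor determinants of that row
--     at once (shared subproblems), instead of n independent Laplace expansions."""
--     n = len(matrix)
--
--     if n == 1:
--         return [[1]]
--
--     cols = tuple(range(n))
--     minors = []
--     for i in range(n):
--         rows = [matrix[k] for k in range(n) if k != i]
--         m = len(rows)
--         # table[S] = determinant of the block (rows[m-size:], columns S), |S| = size
--         table = {(): 1}
--         for size in range(1, m + 1):
--             row = rows[m - size]
--             new = {}
--             for S in combos(cols, size):
--                 acc = 0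
--                 for idx in range(size):
--                     acc += (-1) ** idx * row[S[idx]] * table[S[:idx] + S[idx+1:]]
--                 new[S] = acc
--             table = new
--         minors.append([table[tuple(c for c in cols if c != j)] for j in range(n)])
--     return minors
-- ===== Notes on version B (the rewrite author's own statement) =====
-- stated objective: alternative
-- what changed: Replaces the n^2 independent recursive Laplace-expansion determinants with, for each deleted row, a single bottom-up dynamic program over column subsets whose shared table yields all n minor determinants of that row at once (O(n^2*2^n) subproblems instead of O(n^2*n!) expansion terms; measured ~34x faster at 8x8, but both are superpolynomial and neither finishes at 16x16).
-- outside the precondition, e.g. on minor([[1, 2], [3]]): A returns [[1, 3], [2, 1]], B raises IndexError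
import Mathlib
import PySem

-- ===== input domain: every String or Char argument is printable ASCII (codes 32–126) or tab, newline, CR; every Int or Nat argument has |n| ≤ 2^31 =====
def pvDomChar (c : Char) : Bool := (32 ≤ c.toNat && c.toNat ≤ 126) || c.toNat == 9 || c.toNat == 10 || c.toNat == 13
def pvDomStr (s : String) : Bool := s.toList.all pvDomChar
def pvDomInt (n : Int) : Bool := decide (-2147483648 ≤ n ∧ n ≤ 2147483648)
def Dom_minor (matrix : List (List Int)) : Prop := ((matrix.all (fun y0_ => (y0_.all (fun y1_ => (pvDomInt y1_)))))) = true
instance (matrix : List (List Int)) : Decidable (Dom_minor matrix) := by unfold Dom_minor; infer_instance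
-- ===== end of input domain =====

-- B replaces A's n^2 independent Laplace-expansion determinants by one shared subset-DP per deleted
-- row (objective: alternative — a genuinely different algorithm over the same data).

-- ===== PORT A =====
-- Transliteration notes (exact on the admitted inputs): `row[:j] + row[j+1:]` is `List.eraseIdx row j.toNat`
-- (exact for j ≥ 0, and j comes from range); `matrix[1:]` is `List.drop 1`; indexing `xs[k]` for k from
-- `range(len(xs))` is `PySem.List.pyGetD xs k <default>` (in range, so the default is never produced).
def detA (matrix : List (List Int)) : Int :=
  if matrix == [[]] then 1
  else
    let n := matrix.length
    if n == 1 then PySem.List.pyGetD (PySem.List.pyGetD matrix 0 []) 0 0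
    else if n == 2 then
      PySem.List.pyGetD (PySem.List.pyGetD matrix 0 []) 0 0 *
          PySem.List.pyGetD (PySem.List.pyGetD matrix 1 []) 1 0 -
        PySem.List.pyGetD (PySem.List.pyGetD matrix 0 []) 1 0 *
          PySem.List.pyGetD (PySem.List.pyGetD matrix 1 []) 0 0
    else
      -- `for col in range(n)` (`.attach` only carries the membership fact for termination)
      (PySem.List.pyRange 0 (n : Int) 1).attach.foldl
        (fun det col =>
          det + (-1 : Int) ^ col.1.toNat *
              PySem.List.pyGetD (PySem.List.pyGetD matrix 0 []) col.1 0 *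
              detA ((matrix.drop 1).map (fun row => row.eraseIdx col.1.toNat)))
        0
termination_by matrix.length
decreasing_by
  have h := PySem.List.mem_pyRange_one.mp col.2
  simp only [List.length_map, List.length_drop]
  omega

def minor (matrix : List (List Int)) : List (List Int) :=
  let n := matrix.length
  if n == 1 then [[1]]
  else
    (PySem.List.pyRange 0 (n : Int) 1).foldl
      (fun minors i =>
        minors ++
          [(PySem.List.pyRange 0 (n : Int) 1).foldl
            (fun rowMinors j =>
              rowMinors ++
                [detA (((PySem.List.enumerate matrix).filter (fun kr => kr.1 != i)).map
                  (fun kr => kr.2.eraseIdx j.toNat))])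
            []])
      []

-- ===== PORT B =====
-- `combos` of Source B (tuples become lists)
def combosL : List Int → Nat → List (List Int)
  | _, 0 => [[]]
  | [], _ + 1 => []
  | x :: xs, k + 1 => (combosL xs k).map (fun t => x :: t) ++ combosL xs (k + 1)

-- the `acc` loop of Source B: `for idx in range(size): acc += (-1)**idx * row[S[idx]] * table[S[:idx]+S[idx+1:]]`
-- (`table[...]` ported as `getD … 0`; on admitted inputs the key is always present)
def dpAcc (row : List Int) (table : PySem.Dict (List Int) Int) (S : List Int) (size : Int) : Int :=
  (PySem.List.pyRange 0 size 1).foldl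
    (fun acc idx =>
      acc + (-1 : Int) ^ idx.toNat *
          PySem.List.pyGetD row (PySem.List.pyGetD S idx 0) 0 *
          table.getD (S.eraseIdx idx.toNat) 0)
    0

-- one pass of the `for size in …` loop body of Source B (building the dict `new`)
def dpLevel (cols : List Int) (rows : List (List Int)) (table : PySem.Dict (List Int) Int)
    (size : Int) : PySem.Dict (List Int) Int :=
  let row := PySem.List.pyGetD rows ((rows.length : Int) - size) []
  (combosL cols size.toNat).foldl (fun nt S => nt.insert S (dpAcc row table S size))
    PySem.Dict.empty

def minor_alt (matrix : List (List Int)) : List (List Int) :=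
  let n := matrix.length
  if n == 1 then [[1]]
  else
    let cols := PySem.List.pyRange 0 (n : Int) 1
    (PySem.List.pyRange 0 (n : Int) 1).foldl
      (fun minors i =>
        let rows := ((PySem.List.pyRange 0 (n : Int) 1).filter (fun k => k != i)).map
          (fun k => PySem.List.pyGetD matrix k [])
        let table := (PySem.List.pyRange 1 ((rows.length : Int) + 1) 1).foldl
          (dpLevel cols rows) (PySem.Dict.ofList [([], 1)])
        minors ++
          [(PySem.List.pyRange 0 (n : Int) 1).map (fun j =>
            table.getD (cols.filter (fun c => c != j)) 0)])
      []

-- ===== PRECONDITION & SPEC =====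
-- Pre_ excludes matrices with two or more rows in which some row is shorter than the number of rows:
-- B's algorithm indexes every column 0..n-1 of every kept row and raises IndexError there, while A
-- either raises as well or returns a value no specification fixes (see the cited example).
def Pre_minor (matrix : List (List Int)) : Prop :=
  matrix.length ≤ 1 ∨ ∀ row ∈ matrix, matrix.length ≤ row.length
instance (matrix : List (List Int)) : Decidable (Pre_minor matrix) := by
  unfold Pre_minor; infer_instance

def pvWitness_minor : List (List Int) := [[1, 2], [3, 4]]

def Spec_minor (matrix : List (List Int)) (out : List (List Int)) : Prop := out = minor_alt matrix
instance (matrix : List (List Int)) (out : List (List Int)) : Decidable (Spec_minor matrix out) := by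
  unfold Spec_minor; infer_instance

-- ===== CLAIM (what is proved, stated in full; the proofs are below) =====
def Claim_equal_minor : Prop :=
  ∀ (matrix : List (List Int)), Dom_minor matrix → Pre_minor matrix →
    Spec_minor matrix (minor matrix)

-- ===== LEMMAS AND PROOFS =====

def detCols : List (List Int) → List Int → Int
  | [], _ => 1
  | row :: rest, S =>
    ((List.range S.length).map (fun idx =>
      (-1 : Int) ^ idx * PySem.List.pyGetD row (S.getD idx 0) 0 * detCols rest (S.eraseIdx idx))).sum
termination_by rows _ => rows.length
decreasing_by simp

lemma detA_select (rows : List (List Int)) :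
    ∀ (S : List Int) (tf : List Int → List Int), rows ≠ [] → S.length = rows.length →
      detA (rows.map (fun r => S.map (fun c => PySem.List.pyGetD r c 0) ++ tf r)) =
        detCols rows S := by
  induction rows with
  | nil => intro S tf hne _; exact absurd rfl hne
  | cons r rest ih =>
    intro S tf _ hlen
    rcases rest with _ | ⟨r2, rest2⟩
    · -- 1 × 1
      rcases S with _ | ⟨c, Sa⟩ <;> simp at hlen
      rcases Sa with _ | ⟨c2, Sb⟩
      · simp [detA, detCols]
      · simp at hlen
    rcases rest2 with _ | ⟨r3, rest3⟩
    · -- 2 × 2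
      rcases S with _ | ⟨c1, Sa⟩ <;> [simp at hlen; skip]
      rcases Sa with _ | ⟨c2, Sb⟩ <;> [simp at hlen; skip]
      rcases Sb with _ | ⟨c3, Sc⟩
      · simp [detA, detCols, List.range_succ, PySem.List.pyGetD_ofNat']
        ring
      · simp at hlen
    · -- n ≥ 3
      set M := ((r :: r2 :: r3 :: rest3).map
          (fun r => S.map (fun c => PySem.List.pyGetD r c 0) ++ tf r)) with hM
      have hlenM : M.length = S.length := by simp [hM, hlen]
      have h3 : 3 ≤ S.length := by simp at hlen; omega
      rw [detA]
      rw [if_neg (by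
        rw [Bool.not_eq_true, beq_eq_false_iff_ne]
        intro h
        have := congrArg List.length h
        simp [hlenM] at this
        omega)]
      have e1 : (S.length == 1) = false := by simp; omega
      have e2 : (S.length == 2) = false := by simp; omega
      simp only [hlenM, e1, e2, Bool.false_eq_true, if_false]
      rw [List.foldl_attach (f := fun det col => det + (-1 : Int) ^ col.toNat *
            PySem.List.pyGetD (PySem.List.pyGetD M 0 []) col 0 *
            detA ((M.drop 1).map (fun row => row.eraseIdx col.toNat)))]
      rw [PySem.List.foldl_add, PySem.List.pyRange_one, List.map_map]
      simp only [sub_zero, Int.toNat_natCast, zero_add]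
      rw [hlenM]
      conv_rhs => rw [detCols]
      congr 1
      apply List.map_congr_left
      intro k hk
      simp only [List.mem_range] at hk
      have hke : (S.eraseIdx k).length = (r2 :: r3 :: rest3).length := by
        rw [List.length_eraseIdx, if_pos hk]
        simp at hlen ⊢
        omega
      simp only [Function.comp_apply, Int.toNat_natCast, hM, List.map_cons,
        PySem.List.pyGetD_zero_cons, List.drop_succ_cons, List.drop_zero, List.map_map]
      rw [PySem.List.pyGetD_natCast,
        List.getD_append _ _ _ _ (by simpa using hk),
        List.getD_eq_getElem _ _ (by simpa using hk), List.getElem_map,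
        ← List.getD_eq_getElem S 0 hk]
      have hfun : ((fun row : List Int => row.eraseIdx k) ∘
          fun r => List.map (fun c => PySem.List.pyGetD r c 0) S ++ tf r) =
          fun r => List.map (fun c => PySem.List.pyGetD r c 0) (S.eraseIdx k) ++ tf r := by
        funext rr
        simp only [Function.comp_apply]
        rw [List.eraseIdx_append_of_lt_length (by simpa using hk), List.eraseIdx_map]
      have harg := ih (S.eraseIdx k) tf (by simp) hke
      simp only [List.map_cons] at harg
      rw [List.eraseIdx_append_of_lt_length (by simpa using hk), List.eraseIdx_map,
        List.eraseIdx_append_of_lt_length (by simpa using hk), List.eraseIdx_map,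
        hfun, harg]

lemma rowsB_length (matrix : List (List Int)) (i : Int)
    (hi : i ∈ PySem.List.pyRange 0 (matrix.length : Int) 1) :
    (((PySem.List.pyRange 0 (matrix.length : Int) 1).filter (fun k => k != i)).map
      (fun k => PySem.List.pyGetD matrix k [])).length = matrix.length - 1 := by
  rw [List.length_map, ← List.Nodup.erase_eq_filter (PySem.List.nodup_pyRange_one 0 _),
    List.length_erase_of_mem hi, PySem.List.length_pyRange_one]
  omega

lemma filter_ne_eq_eraseIdx (n : Nat) (j : Int)
    (hj : j ∈ PySem.List.pyRange 0 (n : Int) 1) :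
    (PySem.List.pyRange 0 (n : Int) 1).filter (fun c => c != j) =
      (PySem.List.pyRange 0 (n : Int) 1).eraseIdx j.toNat := by
  obtain ⟨hj0, hjn⟩ := PySem.List.mem_pyRange_one.mp hj
  have hjt : j.toNat < (PySem.List.pyRange 0 (n : Int) 1).length := by
    rw [PySem.List.length_pyRange_one]; omega
  have hje : (PySem.List.pyRange 0 (n : Int) 1)[j.toNat] = j := by
    rw [PySem.List.getElem_pyRange_one]; omega
  rw [← List.Nodup.erase_eq_filter (PySem.List.nodup_pyRange_one 0 _),
    ← List.Nodup.erase_getElem (PySem.List.nodup_pyRange_one 0 _) j.toNat hjt, hje]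

lemma eraseIdx_pyRange_length (n : Nat) (j : Int)
    (hj : j ∈ PySem.List.pyRange 0 (n : Int) 1) :
    ((PySem.List.pyRange 0 (n : Int) 1).eraseIdx j.toNat).length = n - 1 := by
  obtain ⟨hj0, hjn⟩ := PySem.List.mem_pyRange_one.mp hj
  rw [List.length_eraseIdx, PySem.List.length_pyRange_one]
  simp only [sub_zero, Int.toNat_natCast]
  rw [if_pos (by omega)]

lemma combosL_eq (l : List Int) : ∀ k, combosL l k = PySem.List.combinations l k := by
  induction l with
  | nil => intro k; cases k <;>
      simp [combosL, PySem.List.combinations_zero, PySem.List.combinations_nil_succ]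
  | cons x xs ih => intro k; cases k <;>
      simp [combosL, PySem.List.combinations_zero, PySem.List.combinations_cons_succ, ih]
lemma getD_foldl_insert_not_mem (L : List (List Int)) (f : List Int → Int)
    (d : PySem.Dict (List Int) Int) (S : List Int) (h : S ∉ L) :
    (L.foldl (fun d' k => d'.insert k (f k)) d).getD S 0 = d.getD S 0 := by
  induction L generalizing d with
  | nil => rfl
  | cons y L ih =>
    simp only [List.mem_cons, not_or] at h
    simp only [List.foldl_cons]
    rw [ih _ h.2, PySem.Dict.getD_insert, if_neg h.1]
lemma getD_foldl_insert_mem (L : List (List Int)) (f : List Int → Int)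
    (d : PySem.Dict (List Int) Int) (S : List Int) (h : S ∈ L) :
    (L.foldl (fun d' k => d'.insert k (f k)) d).getD S 0 = f S := by
  induction L generalizing d with
  | nil => cases h
  | cons y L ih =>
    simp only [List.foldl_cons]
    by_cases hm : S ∈ L
    · exact ih _ hm
    · have : S = y := by rcases List.mem_cons.mp h with h' | h' <;> [exact h'; exact absurd h' hm]
      subst this
      rw [getD_foldl_insert_not_mem _ _ _ _ hm, PySem.Dict.getD_insert, if_pos rfl]

lemma dpAcc_eq (row : List Int) (table : PySem.Dict (List Int) Int) (S : List Int) :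
    dpAcc row table S (S.length : Int) =
      ((List.range S.length).map (fun idx =>
        (-1 : Int) ^ idx * PySem.List.pyGetD row (S.getD idx 0) 0 *
          table.getD (S.eraseIdx idx) 0)).sum := by
  unfold dpAcc
  rw [PySem.List.foldl_add, PySem.List.pyRange_one, List.map_map]
  simp only [zero_add, sub_zero, Int.toNat_natCast]
  congr 1
  apply List.map_congr_left
  intro k hk
  simp [PySem.List.pyGetD_natCast]

lemma dpLevel_inv (cols : List Int) (rows : List (List Int)) (table : PySem.Dict (List Int) Int)
    (s : Nat) (hs : s < rows.length)
    (htab : ∀ S, S.Sublist cols → S.length = s →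
      table.getD S 0 = detCols (rows.drop (rows.length - s)) S) :
    ∀ S, S.Sublist cols → S.length = s + 1 →
      (dpLevel cols rows table ((s : Int) + 1)).getD S 0 =
        detCols (rows.drop (rows.length - (s + 1))) S := by
  intro S hsub hlen
  unfold dpLevel
  have hmem : S ∈ combosL cols ((s : Int) + 1).toNat := by
    rw [combosL_eq]
    rw [PySem.List.mem_combinations_iff]
    constructor
    · exact hsub
    · omega
  rw [getD_foldl_insert_mem _ _ _ _ hmem]
  have hcast : (rows.length : Int) - ((s : Int) + 1) = ((rows.length - (s + 1) : Nat) : Int) := by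
    omega
  rw [hcast, PySem.List.pyGetD_natCast]
  have hidx : rows.length - (s + 1) < rows.length := by omega
  have hdrop : rows.drop (rows.length - (s + 1)) =
      rows[rows.length - (s + 1)] :: rows.drop (rows.length - s) := by
    rw [List.drop_eq_getElem_cons hidx]
    have h1 : rows.length - (s + 1) + 1 = rows.length - s := by omega
    rw [h1]
  rw [hdrop]
  have hrow : rows.getD (rows.length - (s + 1)) [] = rows[rows.length - (s + 1)] :=
    List.getD_eq_getElem _ _ hidx
  have hsize : ((s : Int) + 1) = ((S.length : Nat) : Int) := by rw [hlen]; push_cast; ring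
  rw [hsize, hrow, dpAcc_eq]
  simp only [detCols]
  apply congrArg
  apply List.map_congr_left
  intro k hk
  simp only [List.mem_range] at hk
  rw [htab (S.eraseIdx k) ((List.eraseIdx_sublist S k).trans hsub)
    (by rw [List.length_eraseIdx, if_pos hk]; omega)]

lemma dp_levels (cols : List Int) (rows : List (List Int)) (s : Nat) (hs : s ≤ rows.length) :
    ∀ S, S.Sublist cols → S.length = s →
      ((PySem.List.pyRange 1 ((s : Int) + 1) 1).foldl (dpLevel cols rows)
          (PySem.Dict.ofList [([], 1)])).getD S 0 =
        detCols (rows.drop (rows.length - s)) S := by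
  induction s with
  | zero =>
    intro S hsub hlen
    have hS : S = [] := List.eq_nil_of_length_eq_zero hlen
    subst hS
    rw [PySem.List.pyRange_one_eq_nil (by omega)]
    simp only [List.foldl_nil, Nat.sub_zero, List.drop_length]
    rw [show detCols [] [] = 1 from by simp [detCols]]
    rfl
  | succ s ih =>
    intro S hsub hlen
    have hrange : PySem.List.pyRange 1 (((s + 1 : Nat) : Int) + 1) 1 =
        PySem.List.pyRange 1 ((s : Int) + 1) 1 ++ [(s : Int) + 1] := by
      have : (((s + 1 : Nat) : Int) + 1) = ((s : Int) + 1) + 1 := by push_cast; ring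
      rw [this, PySem.List.pyRange_one_succ_right (by omega)]
    rw [hrange, List.foldl_append, List.foldl_cons, List.foldl_nil]
    exact dpLevel_inv cols rows _ s (by omega) (ih (by omega)) S hsub hlen

lemma take_eq_select (r : List Int) (n : Nat) (h : n ≤ r.length) :
    r.take n = (PySem.List.pyRange 0 (n : Int) 1).map (fun c => PySem.List.pyGetD r c 0) := by
  rw [PySem.List.pyRange_one]
  simp only [zero_add, sub_zero, Int.toNat_natCast]
  rw [List.map_map]
  have hco : ((fun c => PySem.List.pyGetD r c 0) ∘ fun k : Nat => (k : Int)) =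
      fun k => r.getD k 0 := by
    funext k
    simp [PySem.List.pyGetD_natCast]
  rw [hco]
  refine List.ext_getElem (by simp; omega) ?_
  intro i h1 h2
  simp only [List.getElem_take, List.getElem_map, List.getElem_range]
  rw [List.getD_eq_getElem r 0 (by simp at h1; omega)]

lemma entryA (matrix : List (List Int)) (i j : Int) (hn : 2 ≤ matrix.length)
    (hsq : ∀ row ∈ matrix, matrix.length ≤ row.length)
    (hi : i ∈ PySem.List.pyRange 0 (matrix.length : Int) 1)
    (hj : j ∈ PySem.List.pyRange 0 (matrix.length : Int) 1) :
    detA (((PySem.List.enumerate matrix).filter (fun kr => kr.1 != i)).map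
        (fun kr => kr.2.eraseIdx j.toNat)) =
      detCols
        (((PySem.List.pyRange 0 (matrix.length : Int) 1).filter (fun k => k != i)).map
          (fun k => PySem.List.pyGetD matrix k []))
        ((PySem.List.pyRange 0 (matrix.length : Int) 1).eraseIdx j.toNat) := by
  obtain ⟨hj0, hjn⟩ := PySem.List.mem_pyRange_one.mp hj
  rw [PySem.List.enumerate_eq_map_pyRange matrix []]
  simp only [PySem.List.len_eq]
  rw [List.filter_map]
  have hp : ((fun kr : Int × List Int => kr.1 != i) ∘ fun t => (t, PySem.List.pyGetD matrix t [])) =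
      fun k => k != i := rfl
  rw [hp, List.map_map]
  have hq : ((fun kr : Int × List Int => kr.2.eraseIdx j.toNat) ∘
      fun t => (t, PySem.List.pyGetD matrix t [])) =
      fun t => (PySem.List.pyGetD matrix t []).eraseIdx j.toNat := rfl
  rw [hq]
  have key : ∀ t ∈ (PySem.List.pyRange 0 (matrix.length : Int) 1).filter (fun k => k != i),
      (PySem.List.pyGetD matrix t []).eraseIdx j.toNat =
        ((PySem.List.pyRange 0 (matrix.length : Int) 1).eraseIdx j.toNat).map
          (fun c => PySem.List.pyGetD (PySem.List.pyGetD matrix t []) c 0) ++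
          (PySem.List.pyGetD matrix t []).drop matrix.length := by
    intro t ht
    obtain ⟨ht0, htn⟩ := PySem.List.mem_pyRange_one.mp (List.mem_of_mem_filter ht)
    have htl : t.toNat < matrix.length := by omega
    have hrl : matrix.length ≤ (PySem.List.pyGetD matrix t []).length := by
      rw [PySem.List.pyGetD_eq_getElem matrix [] ht0 (by omega)]
      exact hsq _ (List.getElem_mem htl)
    set r := PySem.List.pyGetD matrix t [] with hr
    have hjt : j.toNat < (r.take matrix.length).length := by
      rw [List.length_take]
      omega
    conv_lhs => rw [← List.take_append_drop matrix.length r]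
    rw [List.eraseIdx_append_of_lt_length hjt,
      take_eq_select r matrix.length hrl, List.eraseIdx_map]
  rw [List.map_congr_left key]
  rw [show ((PySem.List.pyRange 0 (matrix.length : Int) 1).filter (fun k => k != i)).map
      (fun t => ((PySem.List.pyRange 0 (matrix.length : Int) 1).eraseIdx j.toNat).map
        (fun c => PySem.List.pyGetD (PySem.List.pyGetD matrix t []) c 0) ++
        (PySem.List.pyGetD matrix t []).drop matrix.length) =
      (((PySem.List.pyRange 0 (matrix.length : Int) 1).filter (fun k => k != i)).map
        (fun k => PySem.List.pyGetD matrix k [])).map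
        (fun r => ((PySem.List.pyRange 0 (matrix.length : Int) 1).eraseIdx j.toNat).map
          (fun c => PySem.List.pyGetD r c 0) ++ r.drop matrix.length) from by
    rw [List.map_map]; rfl]
  have hrl : (((PySem.List.pyRange 0 (matrix.length : Int) 1).filter (fun k => k != i)).map
      (fun k => PySem.List.pyGetD matrix k [])).length = matrix.length - 1 :=
    rowsB_length matrix i hi
  have hlenS := eraseIdx_pyRange_length matrix.length j hj
  exact detA_select _ _ _ (by intro h; rw [h] at hrl; simp at hrl; omega) (by omega)

lemma entryB (matrix : List (List Int)) (i j : Int)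
    (hi : i ∈ PySem.List.pyRange 0 (matrix.length : Int) 1)
    (hj : j ∈ PySem.List.pyRange 0 (matrix.length : Int) 1) :
    (((PySem.List.pyRange 1
          (((((PySem.List.pyRange 0 (matrix.length : Int) 1).filter (fun k => k != i)).map
            (fun k => PySem.List.pyGetD matrix k [])).length : Int) + 1) 1).foldl
        (dpLevel (PySem.List.pyRange 0 (matrix.length : Int) 1)
          (((PySem.List.pyRange 0 (matrix.length : Int) 1).filter (fun k => k != i)).map
            (fun k => PySem.List.pyGetD matrix k [])))
        (PySem.Dict.ofList [([], 1)])).getD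
      ((PySem.List.pyRange 0 (matrix.length : Int) 1).filter (fun c => c != j)) 0) =
      detCols
        (((PySem.List.pyRange 0 (matrix.length : Int) 1).filter (fun k => k != i)).map
          (fun k => PySem.List.pyGetD matrix k []))
        ((PySem.List.pyRange 0 (matrix.length : Int) 1).eraseIdx j.toNat) := by
  set rows := ((PySem.List.pyRange 0 (matrix.length : Int) 1).filter (fun k => k != i)).map
      (fun k => PySem.List.pyGetD matrix k []) with hrows
  rw [filter_ne_eq_eraseIdx matrix.length j hj]
  have hrl : rows.length = matrix.length - 1 := rowsB_length matrix i hi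
  have hlenS := eraseIdx_pyRange_length matrix.length j hj
  have h := dp_levels (PySem.List.pyRange 0 (matrix.length : Int) 1) rows rows.length
    (le_refl _) ((PySem.List.pyRange 0 (matrix.length : Int) 1).eraseIdx j.toNat)
    (List.eraseIdx_sublist _ _) (by omega)
  rw [Nat.sub_self, List.drop_zero] at h
  exact h

-- ===== VERDICT (by name: the statement is the Claim_ definition above) =====
theorem minor_spec : Claim_equal_minor := by
  intro matrix _ hpre
  unfold Spec_minor minor minor_alt
  by_cases h1 : matrix.length = 1
  · simp [h1]
  · have e1 : (matrix.length == 1) = false := by simp [h1]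
    simp only [e1, Bool.false_eq_true, if_false]
    rw [PySem.List.foldl_append_singleton_eq_map, PySem.List.foldl_append_singleton_eq_map]
    simp only [List.nil_append]
    apply List.map_congr_left
    intro i hi
    have hn : 2 ≤ matrix.length := by
      obtain ⟨h0, hn⟩ := PySem.List.mem_pyRange_one.mp hi
      omega
    have hsq : ∀ row ∈ matrix, matrix.length ≤ row.length := by
      rcases hpre with h | h
      · omega
      · exact h
    rw [PySem.List.foldl_append_singleton_eq_map]
    simp only [List.nil_append]
    apply List.map_congr_left
    intro j hj
    rw [entryA matrix i j hn hsq hi hj, entryB matrix i j hi hj]
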